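-- pv_equiv track=rewrite | github.com/nguyenvulebinh/OCR-Seq2Seq-Language-Model | evaluate_correction.py | buffered_read
-- ===== SOURCE A (Python) =====
-- def buffered_read(input, buffer_size):
--     buffer = []
--     for src_str in input:
--         buffer.append(src_str.strip())
--         if len(buffer) >= buffer_size:
--             yield buffer
--             buffer = []
--
--     if len(buffer) > 0:
--         yield buffer
-- ===== SOURCE B (Python) =====
-- from itertools import islice
--
-- def buffered_read(input, buffer_size):
--     it = iter(input)
--     while True:
--         chunk = list(islice(it, buffer_size))
--         if not chunk:
--             break
--         yield [s.strip() for s in chunk]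
-- ===== Notes on version B (the rewrite author's own statement) =====
-- stated objective: idiomatic
-- what changed: Replaces the running-buffer accumulator with iterator window-pulling: repeatedly take a fixed-size window via itertools.islice and strip each window with a comprehension, so no buffer list or length check is maintained.
-- outside the precondition, e.g. on buffered_read([' a '], 0): A returns [['a']], B returns []; on buffered_read([' a '], -1): A returns [['a']], B raises ValueError
import Mathlib
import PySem

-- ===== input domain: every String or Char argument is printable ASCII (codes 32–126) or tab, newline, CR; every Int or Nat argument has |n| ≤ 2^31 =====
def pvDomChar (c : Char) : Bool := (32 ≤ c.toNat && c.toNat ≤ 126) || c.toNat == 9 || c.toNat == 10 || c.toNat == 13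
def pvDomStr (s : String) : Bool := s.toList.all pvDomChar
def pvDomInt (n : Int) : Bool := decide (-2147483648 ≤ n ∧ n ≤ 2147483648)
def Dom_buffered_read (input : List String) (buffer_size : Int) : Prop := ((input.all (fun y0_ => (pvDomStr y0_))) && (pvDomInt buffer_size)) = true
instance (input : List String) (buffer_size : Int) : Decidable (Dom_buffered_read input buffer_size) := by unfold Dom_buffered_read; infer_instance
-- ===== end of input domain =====

-- B chunks the input by pulling fixed-size windows (islice) instead of maintaining a running
-- buffer; same batches for buffer_size ≥ 1 (Pre_); both Pythons are generators, materialised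
-- as lists of batches here, so return value only.

-- ===== PORT A =====
-- the for-loop with its running buffer, emitting when len(buffer) >= buffer_size
def buffered_read_go (buffer_size : Int) : List String → List String → List (List String)
  | [], buffer => if buffer.length > 0 then [buffer] else []
  | src_str :: rest, buffer =>
      -- buffer.append(src_str.strip()); if len(buffer) >= buffer_size: yield buffer; buffer = []
      if ((buffer ++ [PySem.Str.strip src_str]).length : Int) ≥ buffer_size then
        (buffer ++ [PySem.Str.strip src_str]) :: buffered_read_go buffer_size rest []
      else
        buffered_read_go buffer_size rest (buffer ++ [PySem.Str.strip src_str])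

def buffered_read (input : List String) (buffer_size : Int) : List (List String) :=
  buffered_read_go buffer_size input []

-- ===== PORT B =====
-- chunk = list(islice(it, buffer_size)); break when the chunk is empty; yield the stripped chunk
def buffered_read_alt_go (n : Nat) (xs : List String) : List (List String) :=
  let chunk := xs.take n
  if h : chunk = [] then []
  else (chunk.map PySem.Str.strip) :: buffered_read_alt_go n (xs.drop n)
termination_by xs.length
decreasing_by
  simp only [List.length_drop]
  have hx : xs ≠ [] := by intro hx; simp [chunk, hx] at h
  have hn : 0 < n := by
    rcases Nat.eq_zero_or_pos n with h0 | h0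
    · simp [chunk, h0] at h
    · exact h0
  have := List.length_pos_iff.mpr hx
  omega

def buffered_read_alt (input : List String) (buffer_size : Int) : List (List String) :=
  buffered_read_alt_go buffer_size.toNat input

-- ===== PRECONDITION & SPEC =====
-- Pre_ excludes buffer_size ≤ 0, where A still returns (singleton batches, an accident of its
-- ">=" check) while B's islice produces no chunks (size 0) or raises ValueError (negative size).
def Pre_buffered_read (input : List String) (buffer_size : Int) : Prop := 1 ≤ buffer_size
instance (input : List String) (buffer_size : Int) : Decidable (Pre_buffered_read input buffer_size) := by unfold Pre_buffered_read; infer_instance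
def pvWitness_buffered_read : List String × Int := ([" a ", "b", " c"], 2)

def Spec_buffered_read (input : List String) (buffer_size : Int) (out : List (List String)) : Prop := out = buffered_read_alt input buffer_size
instance (input : List String) (buffer_size : Int) (out : List (List String)) : Decidable (Spec_buffered_read input buffer_size out) := by unfold Spec_buffered_read; infer_instance

-- ===== CLAIM (what is proved, stated in full; the proofs are below) =====
def Claim_equal_buffered_read : Prop := ∀ (input : List String) (buffer_size : Int), Dom_buffered_read input buffer_size → Pre_buffered_read input buffer_size → Spec_buffered_read input buffer_size (buffered_read input buffer_size)

-- ===== LEMMAS AND PROOFS =====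

-- plain n-chunking of an already-stripped stream; both ports reduce to this
def pvChunks (n : Nat) (ys : List String) : List (List String) :=
  if h : ys.take n = [] then []
  else ys.take n :: pvChunks n (ys.drop n)
termination_by ys.length
decreasing_by
  simp only [List.length_drop]
  have hy : ys ≠ [] := by intro hy; simp [hy] at h
  have hn : 0 < n := by
    rcases Nat.eq_zero_or_pos n with h0 | h0
    · simp [h0] at h
    · exact h0
  have := List.length_pos_iff.mpr hy
  omega

theorem alt_go_eq_chunks (n : Nat) (xs : List String) :
    buffered_read_alt_go n xs = pvChunks n (xs.map PySem.Str.strip) := by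
  induction xs using buffered_read_alt_go.induct n with
  | case1 xs chunk h =>
      have h1 : List.take n xs = [] := h
      have h2 : (xs.map PySem.Str.strip).take n = [] := by
        rw [← List.map_take, h1]; rfl
      rw [buffered_read_alt_go, pvChunks]
      simp only [dif_pos h1, dif_pos h2]
  | case2 xs chunk h ih =>
      have h1 : List.take n xs ≠ [] := h
      have h2 : (xs.map PySem.Str.strip).take n ≠ [] := by
        rw [← List.map_take]; simpa using h1
      have h3 : (List.take n xs).map PySem.Str.strip ≠ [] := by
        rw [List.map_take]; exact h2
      rw [buffered_read_alt_go, pvChunks]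
      simp only [dif_neg h1, ← List.map_take, ← List.map_drop, dif_neg h3]
      rw [ih]

theorem pvChunks_nil (n : Nat) : pvChunks n [] = [] := by
  rw [pvChunks]; simp

theorem goA_eq_chunks (bs : Int) (n : Nat) (hn : 1 ≤ n) (hbs : (n : Int) = bs) :
    ∀ (xs : List String) (buf : List String), buf.length < n →
      buffered_read_go bs xs buf = pvChunks n (buf ++ xs.map PySem.Str.strip) := by
  intro xs
  induction xs with
  | nil =>
      intro buf hlt
      rw [buffered_read_go]
      simp only [List.map_nil, List.append_nil]
      rcases eq_or_ne buf [] with h | h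
      · simp [h, pvChunks_nil]
      · have htake : buf.take n = buf := List.take_of_length_le (Nat.le_of_lt hlt)
        have hdrop : buf.drop n = [] := List.drop_eq_nil_of_le (Nat.le_of_lt hlt)
        rw [if_pos (List.length_pos_iff.mpr h), pvChunks, dif_neg (by rw [htake]; exact h),
            htake, hdrop, pvChunks_nil]
  | cons s rest ih =>
      intro buf hlt
      rw [buffered_read_go]
      have hlen : (buf ++ [PySem.Str.strip s]).length = buf.length + 1 := by simp
      have harr : buf ++ (s :: rest).map PySem.Str.strip
          = (buf ++ [PySem.Str.strip s]) ++ rest.map PySem.Str.strip := by simp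
      by_cases hfull : ((buf ++ [PySem.Str.strip s]).length : Int) ≥ bs
      · have hbn : (buf ++ [PySem.Str.strip s]).length = n := by omega
        rw [if_pos hfull, harr, pvChunks,
            dif_neg (by rw [List.take_left' hbn]; exact List.ne_nil_of_length_pos (by omega)),
            List.take_left' hbn, List.drop_left' hbn, ih [] (by simpa using hn)]
        simp
      · have hlt' : (buf ++ [PySem.Str.strip s]).length < n := by omega
        rw [if_neg hfull, harr, ih _ hlt']

-- ===== VERDICT (by name: the statement is the Claim_ definition above) =====
theorem buffered_read_spec : Claim_equal_buffered_read := by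
  intro input bs _ hpre
  have hp : 1 ≤ bs := hpre
  unfold Spec_buffered_read buffered_read buffered_read_alt
  have hn : 1 ≤ bs.toNat := by omega
  have hbs : ((bs.toNat : Int)) = bs := by omega
  rw [alt_go_eq_chunks, goA_eq_chunks bs bs.toNat hn hbs input [] (by simp only [List.length_nil]; omega)]
  simp
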